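-- pv_equiv track=rewrite | github.com/fernandaars/networking_projects | data_link_emulator/dccnet.py | undo_byte_stuffing
-- ===== SOURCE A (Python) =====
-- def undo_byte_stuffing(lista):
--     size = len(lista)
--     i = 0
--     while i < size:
--         if lista[i] == 27:
--             lista.pop(i)
--             size = size - 1
--         i = i + 1
--     return lista
-- ===== SOURCE B (Python) =====
-- def undo_byte_stuffing(lista):
--     out = []
--     skip = False
--     for x in lista:
--         if skip:
--             out.append(x)
--             skip = False
--         elif x == 27:
--             skip = True
--         else:
--             out.append(x)
--     return out
-- ===== Notes on version B (the rewrite author's own statement) =====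
-- stated objective: alternative
-- what changed: Replaces the index-based while loop with in-place pop(i) by a single forward pass with a skip-next flag building a new list; A mutates its argument, B does not (return values are equal).
import Mathlib
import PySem

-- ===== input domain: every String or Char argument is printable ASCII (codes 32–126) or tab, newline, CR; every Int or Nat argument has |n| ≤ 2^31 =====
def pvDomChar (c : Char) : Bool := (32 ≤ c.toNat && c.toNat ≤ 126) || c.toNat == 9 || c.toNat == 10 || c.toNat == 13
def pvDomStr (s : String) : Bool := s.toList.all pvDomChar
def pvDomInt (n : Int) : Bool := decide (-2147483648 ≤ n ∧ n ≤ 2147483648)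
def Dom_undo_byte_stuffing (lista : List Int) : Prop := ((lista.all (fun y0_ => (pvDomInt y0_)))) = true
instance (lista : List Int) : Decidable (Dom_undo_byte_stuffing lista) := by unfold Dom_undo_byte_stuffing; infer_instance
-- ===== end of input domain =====

-- B replaces A's index-based while loop with in-place pop(i) by a single forward pass
-- with a skip-next flag building a new list; A mutates its argument, B does not:
-- the equivalence proved here is about the RETURN value only.

-- ===== PORT A =====
-- the while loop: state is (lista, size, i); lista.pop(i) = eraseIdx (i < size = length holds throughout)
def undoA_loop (lista : List Int) (size i : Nat) : List Int :=
  if i < size then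
    if lista.getD i 0 = 27 then
      undoA_loop (lista.eraseIdx i) (size - 1) (i + 1)
    else
      undoA_loop lista size (i + 1)
  else lista
termination_by size - i

def undo_byte_stuffing (lista : List Int) : List Int :=
  undoA_loop lista lista.length 0

-- ===== PORT B =====
-- the for loop: state is (out, skip); out.append(x) = out ++ [x]
def undo_byte_stuffing_alt (lista : List Int) : List Int :=
  (lista.foldl (fun (st : List Int × Bool) x =>
      if st.2 then (st.1 ++ [x], false)
      else if x = 27 then (st.1, true)
      else (st.1 ++ [x], false)) ([], false)).1

-- ===== PRECONDITION & SPEC =====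
def Spec_undo_byte_stuffing (lista : List Int) (out : List Int) : Prop := out = undo_byte_stuffing_alt lista
instance (lista : List Int) (out : List Int) : Decidable (Spec_undo_byte_stuffing lista out) := by unfold Spec_undo_byte_stuffing; infer_instance

-- ===== CLAIM (what is proved, stated in full; the proofs are below) =====
def Claim_equal_undo_byte_stuffing : Prop := ∀ (lista : List Int), Dom_undo_byte_stuffing lista → Spec_undo_byte_stuffing lista (undo_byte_stuffing lista)

-- ===== LEMMAS AND PROOFS =====

-- ===== LEMMAS =====
-- reference function: skip-next-after-27 removal, structurally
def gRef : List Int → Bool → List Int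
  | [], _ => []
  | x :: xs, true => x :: gRef xs false
  | x :: xs, false => if x = 27 then gRef xs true else x :: gRef xs false

theorem foldB_eq (l : List Int) : ∀ (acc : List Int) (sk : Bool),
    (l.foldl (fun (st : List Int × Bool) x =>
      if st.2 then (st.1 ++ [x], false)
      else if x = 27 then (st.1, true)
      else (st.1 ++ [x], false)) (acc, sk)).1 = acc ++ gRef l sk := by
  induction l with
  | nil => intro acc sk; simp [gRef]
  | cons x xs ih =>
    intro acc sk
    cases sk with
    | true => simp [List.foldl, gRef, ih]
    | false =>
      by_cases h : x = 27 <;> simp [List.foldl, gRef, h, ih]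

theorem loopA_eq : ∀ (k : Nat) (pre rest : List Int), rest.length = k →
    undoA_loop (pre ++ rest) (pre.length + rest.length) pre.length = pre ++ gRef rest false := by
  intro k
  induction k using Nat.strong_induction_on with
  | _ k ih =>
    intro pre rest hk
    match rest, hk with
    | [], _ =>
      rw [undoA_loop]
      simp [gRef]
    | x :: rs, hk =>
      rw [undoA_loop]
      have hget : (pre ++ x :: rs).getD pre.length 0 = x := by
        rw [List.getD_eq_getElem?_getD, List.getElem?_append_right (Nat.le_refl _)]
        simp
      by_cases hx : x = 27
      · subst hx
        rw [if_pos (by simp), hget, if_pos rfl,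
            List.eraseIdx_append_of_length_le (Nat.le_refl _)]
        simp only [Nat.sub_self, List.eraseIdx_zero, List.tail_cons]
        match rs with
        | [] =>
          rw [undoA_loop]
          simp [gRef]
        | y :: rs' =>
          have h1 : pre.length + (27 :: y :: rs').length - 1 = (pre ++ [y]).length + rs'.length := by
            simp; omega
          have h2 : pre.length + 1 = (pre ++ [y]).length := by simp
          have h3 : pre ++ y :: rs' = (pre ++ [y]) ++ rs' := by simp
          rw [h1, h2, h3, ih rs'.length (by simp at hk; omega) (pre ++ [y]) rs' rfl]
          simp [gRef]
      · rw [if_pos (by simp), hget, if_neg hx]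
        have h1 : pre.length + (x :: rs).length = (pre ++ [x]).length + rs.length := by
          simp; omega
        have h2 : pre.length + 1 = (pre ++ [x]).length := by simp
        have h3 : pre ++ x :: rs = (pre ++ [x]) ++ rs := by simp
        rw [h1, h2, h3, ih rs.length (by simp at hk; omega) (pre ++ [x]) rs rfl]
        simp [gRef, hx]

-- ===== VERDICT (by name: the statement is the Claim_ definition above) =====
theorem undo_byte_stuffing_spec : Claim_equal_undo_byte_stuffing := by
  intro lista _
  unfold Spec_undo_byte_stuffing undo_byte_stuffing undo_byte_stuffing_alt
  have hA := loopA_eq lista.length [] lista rfl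
  simp only [List.nil_append, List.length_nil, Nat.zero_add] at hA
  rw [hA, foldB_eq]
  simp
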